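-- pv_equiv track=rewrite | github.com/AlagappanRa/Personal-Projects | Factorial.py | sum_even_fact_improved
-- ===== SOURCE A (Python) =====
-- def sum_even_fact_improved(n):
--     factorial_1 = 1
--     result = 1
--     for i in range (1,n+1):
--         factorial_1 *= i
--         if i%2 == 0:
--             result += factorial_1
--         else:
--             continue
--     return result
-- ===== SOURCE B (Python) =====
-- def sum_even_fact_improved(n):
--     # Horner evaluation: the sum of the factorials of the even indices up to n is the
--     # nested product obtained by factoring each factorial out of the later terms, so it
--     # can be evaluated from the innermost (largest) pair of factors outwards and no
--     # factorial is ever formed.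
--     acc = 0
--     for i in range(2 * (n // 2), 1, -2):
--         acc = (i - 1) * i * (acc + 1)
--     return 1 + acc
-- ===== Notes on version B (the rewrite author's own statement) =====
-- stated objective: alternative
-- what changed: B evaluates the sum of even-index factorials as a Horner-style nested product, iterating the even indices downwards and multiplying the accumulator by one small pair of factors per step, whereas A walks every index upwards maintaining a running factorial, a running sum and a parity branch.
import Mathlib
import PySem

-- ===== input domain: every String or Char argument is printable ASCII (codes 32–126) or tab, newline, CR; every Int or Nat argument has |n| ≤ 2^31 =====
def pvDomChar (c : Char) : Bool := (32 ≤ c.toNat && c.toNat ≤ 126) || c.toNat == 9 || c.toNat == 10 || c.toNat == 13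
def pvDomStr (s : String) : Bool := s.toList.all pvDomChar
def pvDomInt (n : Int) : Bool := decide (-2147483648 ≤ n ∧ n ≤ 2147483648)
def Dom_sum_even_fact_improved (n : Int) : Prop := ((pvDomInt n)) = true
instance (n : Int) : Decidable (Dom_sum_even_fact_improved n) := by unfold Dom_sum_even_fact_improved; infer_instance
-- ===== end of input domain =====

-- B evaluates 1 + 2! + 4! + … + (2⌊n/2⌋)! as a Horner-style nested product over the even
-- indices taken downwards (one small (i-1)*i factor per step, no running factorial);
-- A walks every index upwards with a running factorial, a running sum and a parity branch.

-- ===== PORT A =====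
def sum_even_fact_improved (n : Int) : Int :=
  let st := (PySem.List.pyRange 1 (n + 1) 1).foldl
    (fun (st : Int × Int) i =>
      let f := st.1 * i
      if PySem.Int.mod i 2 = 0 then (f, st.2 + f) else (f, st.2))
    (1, 1)
  st.2

-- ===== PORT B =====
def sum_even_fact_improved_alt (n : Int) : Int :=
  let acc := (PySem.List.pyRange (2 * PySem.Int.floordiv n 2) 1 (-2)).foldl
    (fun (acc : Int) i => (i - 1) * i * (acc + 1)) 0
  1 + acc

-- ===== PRECONDITION & SPEC =====
def Spec_sum_even_fact_improved (n : Int) (out : Int) : Prop := out = sum_even_fact_improved_alt n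
instance (n : Int) (out : Int) : Decidable (Spec_sum_even_fact_improved n out) := by unfold Spec_sum_even_fact_improved; infer_instance

-- ===== CLAIM (what is proved, stated in full; the proofs are below) =====
def Claim_equal_sum_even_fact_improved : Prop := ∀ (n : Int), Dom_sum_even_fact_improved n → Spec_sum_even_fact_improved n (sum_even_fact_improved n)

-- ===== LEMMAS AND PROOFS =====

-- A's loop body as a named step function, and the factorial as a reference function
def pvStepA (st : Int × Int) (i : Int) : Int × Int :=
  let f := st.1 * i
  if PySem.Int.mod i 2 = 0 then (f, st.2 + f) else (f, st.2)

def pvFact (k : Int) : Int :=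
  (PySem.List.pyRange 1 (k + 1) 1).foldl (fun r j => r * j) 1

lemma pvFact_succ (m : Nat) : pvFact ((m : Int) + 1) = pvFact (m : Int) * ((m : Int) + 1) := by
  unfold pvFact
  rw [PySem.List.pyRange_one_succ_right (by omega : (1 : Int) ≤ (m : Int) + 1)]
  simp

lemma pvLoopA (m : Nat) :
    (PySem.List.pyRange 1 ((m : Int) + 1) 1).foldl pvStepA (1, 1) =
      (pvFact (m : Int), 1 + ((List.range (m / 2)).map (fun k : Nat => pvFact (2 + 2 * (k : Int)))).sum) := by
  induction m with
  | zero =>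
    decide
  | succ m ih =>
    push_cast
    rw [PySem.List.pyRange_one_succ_right (by omega : (1 : Int) ≤ (m : Int) + 1),
        List.foldl_append, ih]
    simp only [List.foldl_cons, List.foldl_nil, pvStepA]
    rcases Nat.even_or_odd (m + 1) with he | ho
    · have hmod : PySem.Int.mod ((m : Int) + 1) 2 = 0 := by
        simp only [PySem.Int.mod, Int.fmod_eq_emod]
        obtain ⟨k, hk⟩ := he
        omega
      obtain ⟨j, hj⟩ := he
      have hdiv : (m + 1) / 2 = m / 2 + 1 := by omega
      have h2 : (2 : Int) + 2 * ((m / 2 : Nat) : Int) = (m : Int) + 1 := by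
        have : m / 2 = j - 1 := by omega
        rw [this]
        push_cast [show (1:Nat) ≤ j by omega]
        omega
      rw [if_pos hmod, hdiv, List.range_succ, List.map_append, List.sum_append]
      simp only [List.map_cons, List.map_nil, List.sum_cons, List.sum_nil]
      rw [h2, pvFact_succ m]
      simp only [Prod.mk.injEq]
      exact ⟨trivial, by ring⟩
    · have hmod : PySem.Int.mod ((m : Int) + 1) 2 ≠ 0 := by
        simp only [PySem.Int.mod, Int.fmod_eq_emod]
        obtain ⟨k, hk⟩ := ho
        omega
      obtain ⟨j, hj⟩ := ho
      have hdiv : (m + 1) / 2 = m / 2 := by omega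
      rw [if_neg hmod, hdiv, pvFact_succ m]

-- pvFact over a pair of consecutive indices
lemma pvFact_pair (j : Nat) :
    pvFact (2 * ((j : Int) + 1)) = pvFact (2 * (j : Int)) * ((2 * (j : Int) + 1) * (2 * (j : Int) + 2)) := by
  have s1 := pvFact_succ (2 * j)
  have s2 := pvFact_succ (2 * j + 1)
  push_cast at s1 s2 ⊢
  rw [show (2:Int) * (↑j + 1) = (2 * ↑j + 1) + 1 by ring, s2, s1]
  ring

-- B's countdown range is the reverse of the ascending even list
lemma pvRangeDesc (j : Nat) :
    PySem.List.pyRange (2 * (j : Int)) 1 (-2) =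
      ((List.range j).map (fun k : Nat => 2 + 2 * (k : Int))).reverse := by
  simp only [PySem.List.pyRange]
  rw [if_neg (by norm_num), if_neg (by norm_num)]
  rcases Nat.eq_zero_or_pos j with rfl | hj
  · norm_num
  · rw [if_pos (by omega)]
    have hc : ((2 * (j : Int) - 1 + - -2 - 1) / - -2).toNat = j := by
      have h1 : (2 * (j : Int) - 1 + - -2 - 1) = 2 * (j : Int) := by ring
      have h2 : (- -2 : Int) = 2 := by norm_num
      rw [h1, h2]
      omega
    rw [hc]
    apply List.ext_getElem
    · simp
    · intro k h1 h2
      simp only [List.getElem_map, List.getElem_range, List.getElem_reverse,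
        List.length_map, List.length_range] at h1 h2 ⊢
      omega

-- Horner invariant: the nested product as an affine function of the seed
lemma pvHorner (j : Nat) (c : Int) :
    ((List.range j).map (fun k : Nat => 2 + 2 * (k : Int))).foldr
        (fun i acc => (i - 1) * i * (acc + 1)) c =
      pvFact (2 * (j : Int)) * c +
        ((List.range j).map (fun k : Nat => pvFact (2 + 2 * (k : Int)))).sum := by
  induction j generalizing c with
  | zero => simp [pvFact]
  | succ j ih =>
    rw [List.range_succ, List.map_append, List.foldr_append, List.map_append, List.sum_append]
    simp only [List.map_cons, List.map_nil, List.foldr_cons, List.foldr_nil,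
      List.sum_cons, List.sum_nil]
    rw [ih]
    have hcast : (((j + 1 : Nat)) : Int) = (j : Int) + 1 := by push_cast; ring
    have e : pvFact (2 + 2 * (j : Int)) =
        pvFact (2 * (j : Int)) * ((2 * (j : Int) + 1) * (2 * (j : Int) + 2)) := by
      rw [show (2 : Int) + 2 * (j : Int) = 2 * ((j : Int) + 1) by ring]
      exact pvFact_pair j
    rw [hcast, pvFact_pair j, e]
    ring

-- ===== VERDICT (by name: the statement is the Claim_ definition above) =====
theorem sum_even_fact_improved_spec : Claim_equal_sum_even_fact_improved := by
  intro n _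
  unfold Spec_sum_even_fact_improved sum_even_fact_improved sum_even_fact_improved_alt
  rcases le_or_gt n 0 with hn | hn
  · have hfd : PySem.Int.floordiv n 2 ≤ 0 := by
      simp only [PySem.Int.floordiv]
      rw [Int.fdiv_eq_ediv]
      simp
      omega
    rw [PySem.List.pyRange_one_eq_nil (by omega)]
    simp only [List.foldl_nil]
    have : PySem.List.pyRange (2 * PySem.Int.floordiv n 2) 1 (-2) = [] := by
      simp only [PySem.List.pyRange]
      rw [if_neg (by norm_num), if_neg (by norm_num), if_neg (by omega)]
      simp
    rw [this]
    simp
  · obtain ⟨m, rfl⟩ : ∃ m : Nat, n = (m : Int) := ⟨n.toNat, by omega⟩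
    have hfd : PySem.Int.floordiv (m : Int) 2 = ((m / 2 : Nat) : Int) := by
      simp only [PySem.Int.floordiv]
      rw [Int.fdiv_eq_ediv]
      simp
    show ((PySem.List.pyRange 1 ((m:Int) + 1) 1).foldl pvStepA (1, 1)).2 =
      1 + (PySem.List.pyRange (2 * PySem.Int.floordiv (m : Int) 2) 1 (-2)).foldl
        (fun (acc : Int) i => (i - 1) * i * (acc + 1)) 0
    rw [pvLoopA m, hfd, pvRangeDesc (m / 2), List.foldl_reverse, pvHorner (m / 2) 0]
    ring
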